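-- pv_equiv track=rewrite | github.com/heinricitorgau/research-claw-code | local_ai/eval_runner.py | has_balanced_braces
-- ===== SOURCE A (Python) =====
-- def mask_c_comments_and_strings(code: str) -> str:
--     """Mask strings/comments so brace validation is not confused by printf text."""
--     out: list[str] = []
--     i = 0
--     state = "code"
--     while i < len(code):
--         ch = code[i]
--         nxt = code[i + 1] if i + 1 < len(code) else ""
--
--         if state == "code":
--             if ch == "/" and nxt == "/":
--                 out.extend("  ")
--                 i += 2
--                 state = "line_comment"
--                 continue
--             if ch == "/" and nxt == "*":
--                 out.extend("  ")
--                 i += 2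
--                 state = "block_comment"
--                 continue
--             if ch == '"':
--                 out.append(" ")
--                 i += 1
--                 state = "string"
--                 continue
--             if ch == "'":
--                 out.append(" ")
--                 i += 1
--                 state = "char"
--                 continue
--             out.append(ch)
--         elif state == "line_comment":
--             out.append("\n" if ch == "\n" else " ")
--             if ch == "\n":
--                 state = "code"
--         elif state == "block_comment":
--             out.append("\n" if ch == "\n" else " ")
--             if ch == "*" and nxt == "/":
--                 out.append(" ")
--                 i += 1
--                 state = "code"
--         elif state == "string":
--             out.append("\n" if ch == "\n" else " ")
--             if ch == "\\" and nxt: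
--                 out.append(" ")
--                 i += 1
--             elif ch == '"':
--                 state = "code"
--         elif state == "char":
--             out.append("\n" if ch == "\n" else " ")
--             if ch == "\\" and nxt:
--                 out.append(" ")
--                 i += 1
--             elif ch == "'":
--                 state = "code"
--         i += 1
--     return "".join(out)
--
-- def has_balanced_braces(code: str) -> bool:
--     """Return True when braces are balanced and never close before opening."""
--     masked = mask_c_comments_and_strings(code)
--     depth = 0
--     for ch in masked:
--         if ch == "{":
--             depth += 1
--         elif ch == "}":
--             depth -= 1
--             if depth < 0:
--                 return False
--     return depth == 0
-- ===== SOURCE B (Python) =====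
-- def has_balanced_braces(code: str) -> bool:
--     """Single fused pass: lexer state + depth counter, no masked string built."""
--     state = "code"
--     depth = 0
--     i = 0
--     n = len(code)
--     while i < n:
--         ch = code[i]
--         nxt = code[i + 1] if i + 1 < n else ""
--         if state == "code":
--             if ch == "/" and nxt == "/":
--                 state = "line_comment"
--                 i += 2
--                 continue
--             if ch == "/" and nxt == "*":
--                 state = "block_comment"
--                 i += 2
--                 continue
--             if ch == '"':
--                 state = "string"
--                 i += 1
--                 continue
--             if ch == "'":
--                 state = "char"
--                 i += 1
--                 continue
--             if ch == "{":
--                 depth += 1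
--             elif ch == "}":
--                 depth -= 1
--                 if depth < 0:
--                     return False
--         elif state == "line_comment":
--             if ch == "\n":
--                 state = "code"
--         elif state == "block_comment":
--             if ch == "*" and nxt == "/":
--                 i += 1
--                 state = "code"
--         elif state == "string":
--             if ch == "\\" and nxt:
--                 i += 1
--             elif ch == '"':
--                 state = "code"
--         elif state == "char":
--             if ch == "\\" and nxt:
--                 i += 1
--             elif ch == "'":
--                 state = "code"
--         i += 1
--     return depth == 0
-- ===== Notes on version B (the rewrite author's own statement) =====
-- stated objective: alternative
-- what changed: Fuses A's two passes (build a masked copy of the code, then scan the copy counting braces) into a single pass that carries the lexer state and the brace depth together and never materialises the masked string; same O(n) time, O(1) extra space.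
import Mathlib
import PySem

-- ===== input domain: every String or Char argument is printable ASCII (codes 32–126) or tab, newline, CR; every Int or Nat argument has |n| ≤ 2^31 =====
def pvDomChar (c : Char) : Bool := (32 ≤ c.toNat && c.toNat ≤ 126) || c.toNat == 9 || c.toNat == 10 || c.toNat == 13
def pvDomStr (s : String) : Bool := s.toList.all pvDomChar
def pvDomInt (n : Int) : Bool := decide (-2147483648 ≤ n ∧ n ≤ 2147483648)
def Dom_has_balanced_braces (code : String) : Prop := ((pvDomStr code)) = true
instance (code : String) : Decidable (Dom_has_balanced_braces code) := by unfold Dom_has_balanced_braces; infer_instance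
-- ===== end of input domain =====

-- B fuses A's mask-then-count two passes into one pass carrying (state, depth); constant extra space.

-- ===== PORT A =====
-- lexer state of mask_c_comments_and_strings
inductive PvSt | code | lineC | blockC | str | chr
deriving DecidableEq, Repr

-- mask_c_comments_and_strings, with the index loop as structural recursion on the char list
def pvMaskA : PvSt → List Char → List Char
  | _, [] => []
  | .code, '/' :: '/' :: r => ' ' :: ' ' :: pvMaskA .lineC r
  | .code, '/' :: '*' :: r => ' ' :: ' ' :: pvMaskA .blockC r
  | .code, '"' :: r => ' ' :: pvMaskA .str r
  | .code, '\'' :: r => ' ' :: pvMaskA .chr r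
  | .code, ch :: r => ch :: pvMaskA .code r
  | .lineC, '\n' :: r => '\n' :: pvMaskA .code r
  | .lineC, _ :: r => ' ' :: pvMaskA .lineC r
  | .blockC, '*' :: '/' :: r => ' ' :: ' ' :: pvMaskA .code r
  | .blockC, ch :: r => (if ch = '\n' then '\n' else ' ') :: pvMaskA .blockC r
  | .str, '\\' :: _ :: r => ' ' :: ' ' :: pvMaskA .str r
  | .str, '"' :: r => ' ' :: pvMaskA .code r
  | .str, ch :: r => (if ch = '\n' then '\n' else ' ') :: pvMaskA .str r
  | .chr, '\\' :: _ :: r => ' ' :: ' ' :: pvMaskA .chr r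
  | .chr, '\'' :: r => ' ' :: pvMaskA .code r
  | .chr, ch :: r => (if ch = '\n' then '\n' else ' ') :: pvMaskA .chr r

-- the depth-counting for-loop of A, with its early `return False`
def pvCountA : List Char → Int → Bool
  | [], d => d == 0
  | ch :: r, d =>
    if ch = '{' then pvCountA r (d + 1)
    else if ch = '}' then (if d - 1 < 0 then false else pvCountA r (d - 1))
    else pvCountA r d

def has_balanced_braces (code : String) : Bool :=
  pvCountA (pvMaskA .code code.toList) 0

-- ===== PORT B =====
-- fused single pass: same lexer transitions, depth maintained in-line, no masked list
def pvFusedB : PvSt → List Char → Int → Bool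
  | _, [], d => d == 0
  | .code, '/' :: '/' :: r, d => pvFusedB .lineC r d
  | .code, '/' :: '*' :: r, d => pvFusedB .blockC r d
  | .code, '"' :: r, d => pvFusedB .str r d
  | .code, '\'' :: r, d => pvFusedB .chr r d
  | .code, '{' :: r, d => pvFusedB .code r (d + 1)
  | .code, '}' :: r, d => if d - 1 < 0 then false else pvFusedB .code r (d - 1)
  | .code, _ :: r, d => pvFusedB .code r d
  | .lineC, '\n' :: r, d => pvFusedB .code r d
  | .lineC, _ :: r, d => pvFusedB .lineC r d
  | .blockC, '*' :: '/' :: r, d => pvFusedB .code r d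
  | .blockC, _ :: r, d => pvFusedB .blockC r d
  | .str, '\\' :: _ :: r, d => pvFusedB .str r d
  | .str, '"' :: r, d => pvFusedB .code r d
  | .str, _ :: r, d => pvFusedB .str r d
  | .chr, '\\' :: _ :: r, d => pvFusedB .chr r d
  | .chr, '\'' :: r, d => pvFusedB .code r d
  | .chr, _ :: r, d => pvFusedB .chr r d

def has_balanced_braces_alt (code : String) : Bool :=
  pvFusedB .code code.toList 0

-- ===== PRECONDITION & SPEC =====
def Spec_has_balanced_braces (code : String) (out : Bool) : Prop := out = has_balanced_braces_alt code
instance (code : String) (out : Bool) : Decidable (Spec_has_balanced_braces code out) := by unfold Spec_has_balanced_braces; infer_instance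

-- ===== CLAIM (what is proved, stated in full; the proofs are below) =====
def Claim_equal_has_balanced_braces : Prop := ∀ (code : String), Dom_has_balanced_braces code → Spec_has_balanced_braces code (has_balanced_braces code)

-- ===== LEMMAS AND PROOFS =====

lemma pvMain : ∀ (st : PvSt) (cs : List Char) (d : Int),
    pvCountA (pvMaskA st cs) d = pvFusedB st cs d := by
  intro st cs d
  fun_induction pvFusedB st cs d with
  | _ =>
    (try simp_all [pvMaskA, pvCountA])
    all_goals (split <;> simp_all)

-- ===== VERDICT (by name: the statement is the Claim_ definition above) =====
theorem has_balanced_braces_spec : Claim_equal_has_balanced_braces := by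
  intro code _
  unfold Spec_has_balanced_braces has_balanced_braces has_balanced_braces_alt
  exact pvMain .code code.toList 0
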